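-- pv_equiv track=rewrite | github.com/BTheDragonMaster/parasect | src/parasect/core/feature_extraction.py | get_reference_positions_hmm
-- ===== SOURCE A (Python) =====
-- def get_reference_positions_hmm(query, reference, ref_positions):
--     """ Extracts the given positions from a query alignment. The positions are
--         adjusted to account for any gaps in the reference sequence.
--
--         Arguments:
--             query: the aligned query
--             reference: the aligned reference
--             ref_positions: the positions of interest in the unaligned reference
--
--         Returns:
--             a string containing the sequence elements at the adjusted reference
--             positions or None if the reference is too short for some reason
--     """
--     # adjust position of interest to account for gaps in the ref sequence alignment
--     positions = []
--     position_skipping_gaps = 0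
--     for i, amino in enumerate(reference):
--         if amino in "-.":
--             continue
--         if position_skipping_gaps in ref_positions:
--             positions.append(i)
--         position_skipping_gaps += 1
--     if len(positions) != len(ref_positions):
--         return None
--     # extract positions from query sequence
--     return "".join([query[i] for i in positions])
-- ===== SOURCE B (Python) =====
-- def get_reference_positions_hmm(query, reference, ref_positions):
--     # Sort-based extraction: validate the positions up front (all inside the
--     # ungapped reference and duplicate-free, checked on the sorted list), then
--     # read the query directly at the aligned index of each sorted position.
--     # No per-column membership scan and no length recount are needed.
--     mapping = [i for i, amino in enumerate(reference) if amino not in "-."]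
--     sp = sorted(ref_positions)
--     if any(p < 0 or p >= len(mapping) for p in sp):
--         return None
--     if any(x == y for x, y in zip(sp, sp[1:])):
--         return None
--     return "".join(query[mapping[p]] for p in sp)
-- ===== Notes on version B (the rewrite author's own statement) =====
-- stated objective: faster
-- what changed: Replaces A's stateful gap-counting scan, which tests every non-gap column for membership in the ref_positions list, by a sort-based method: sort the positions once, validate them up front (range check plus adjacent-duplicate check on the sorted list, replacing A's after-the-fact length recount), and extract query characters directly at the aligned index of each sorted position.
import Mathlib
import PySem

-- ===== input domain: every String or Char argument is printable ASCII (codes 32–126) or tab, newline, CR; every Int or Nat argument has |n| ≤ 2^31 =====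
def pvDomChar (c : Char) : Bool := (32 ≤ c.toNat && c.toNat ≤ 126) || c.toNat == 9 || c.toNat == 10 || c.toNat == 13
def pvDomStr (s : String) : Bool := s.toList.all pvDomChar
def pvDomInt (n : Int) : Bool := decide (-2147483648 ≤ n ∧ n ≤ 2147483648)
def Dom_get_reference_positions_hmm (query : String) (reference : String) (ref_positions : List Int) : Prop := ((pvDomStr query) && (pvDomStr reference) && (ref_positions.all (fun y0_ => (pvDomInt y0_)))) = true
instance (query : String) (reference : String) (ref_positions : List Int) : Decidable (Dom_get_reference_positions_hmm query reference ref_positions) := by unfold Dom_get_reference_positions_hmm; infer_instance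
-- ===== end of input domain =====

-- B replaces A's membership-scanning gap-counting loop by sorting the positions, validating them
-- up front (range + adjacent-duplicate check) and extracting directly; measured faster in a timing run.

-- helper shared by both ports: Python's `amino in "-."` for a single character
def pvIsGap (c : Char) : Bool := c = '-' || c = '.'

-- ===== PORT A =====
def get_reference_positions_hmm (query : String) (reference : String) (ref_positions : List Int) : Option String :=
  let st := (PySem.List.enumerate reference.toList 0).foldl
    (fun (st : List Int × Int) (p : Int × Char) =>
      if pvIsGap p.2 then st
      else ((if st.2 ∈ ref_positions then st.1 ++ [p.1] else st.1), st.2 + 1))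
    ([], 0)
  if st.1.length ≠ ref_positions.length then none
  else (st.1.mapM (fun i => PySem.Str.pyGet? query i)).map String.mk

-- ===== PORT B =====
def get_reference_positions_hmm_alt (query : String) (reference : String) (ref_positions : List Int) : Option String :=
  let mapping : List Int := (PySem.List.enumerate reference.toList 0).filterMap
    (fun p => if pvIsGap p.2 then none else some p.1)
  let sp := PySem.List.sorted ref_positions (fun x => x) false
  if sp.any (fun p => decide (p < 0) || decide ((mapping.length : Int) ≤ p)) then none
  else if (sp.zip (sp.drop 1)).any (fun q => q.1 == q.2) then none
  -- mapping[p] ported with pyGetD: the range guard above ensures 0 ≤ p < len(mapping), where pyGetD is exact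
  else (sp.mapM (fun p => PySem.Str.pyGet? query (PySem.List.pyGetD mapping p 0))).map String.mk

-- ===== PRECONDITION & SPEC =====
-- Pre_ excludes exactly the inputs on which Python A raises IndexError: the length guard passes
-- but some selected aligned index falls beyond the end of `query` (B raises there too).
def Pre_get_reference_positions_hmm (query : String) (reference : String) (ref_positions : List Int) : Prop :=
  ((List.range (reference.toList.countP (fun c => !pvIsGap c))).countP
      (fun p => decide ((p : Int) ∈ ref_positions)) ≠ ref_positions.length)
  ∨ (∀ i ∈ List.range reference.toList.length,
      (pvIsGap (reference.toList.getD i ' ') = false ∧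
        (((reference.toList.take i).countP (fun c => !pvIsGap c) : Int) ∈ ref_positions)) →
      i < query.toList.length)
instance (query : String) (reference : String) (ref_positions : List Int) : Decidable (Pre_get_reference_positions_hmm query reference ref_positions) := by unfold Pre_get_reference_positions_hmm; infer_instance

def pvWitness_get_reference_positions_hmm : String × String × List Int := ("MAGIC", "M-AGIC", [0, 2])

def Spec_get_reference_positions_hmm (query : String) (reference : String) (ref_positions : List Int) (out : Option String) : Prop := out = get_reference_positions_hmm_alt query reference ref_positions
instance (query : String) (reference : String) (ref_positions : List Int) (out : Option String) : Decidable (Spec_get_reference_positions_hmm query reference ref_positions out) := by unfold Spec_get_reference_positions_hmm; infer_instance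

-- ===== CLAIM (what is proved, stated in full; the proofs are below) =====
def Claim_equal_get_reference_positions_hmm : Prop := ∀ (query : String) (reference : String) (ref_positions : List Int), Dom_get_reference_positions_hmm query reference ref_positions → Pre_get_reference_positions_hmm query reference ref_positions → Spec_get_reference_positions_hmm query reference ref_positions (get_reference_positions_hmm query reference ref_positions)

-- ===== LEMMAS AND PROOFS =====

-- A's positions list, written structurally (j = aligned index, c = gap-skipping counter)
def pvPosA (rp : List Int) : List Char → Int → Int → List Int
  | [], _, _ => []
  | a :: t, j, c =>
      if pvIsGap a then pvPosA rp t (j + 1) c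
      else (if c ∈ rp then [j] else []) ++ pvPosA rp t (j + 1) (c + 1)

-- B's mapping, written structurally
def pvMapB : List Char → Int → List Int
  | [], _ => []
  | a :: t, j => if pvIsGap a then pvMapB t (j + 1) else j :: pvMapB t (j + 1)

-- selection from a mapping at counter offset c (bridges A's list to range-filter form)
def pvSel (rp : List Int) (m : List Int) (c : Int) : List Int :=
  ((List.range m.length).filter (fun p : Nat => decide (((p : Int) + c) ∈ rp))).map (fun p => m.getD p 0)

theorem pvSel_cons (rp : List Int) (x : Int) (m : List Int) (c : Int) :
    pvSel rp (x :: m) c = (if c ∈ rp then [x] else []) ++ pvSel rp m (c + 1) := by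
  unfold pvSel
  rw [List.length_cons, List.range_succ_eq_map, List.filter_cons, List.filter_map]
  simp only [Nat.cast_zero, zero_add]
  by_cases h : c ∈ rp <;>
    simp [h, Function.comp_def, List.map_map, add_assoc, add_comm (1 : Int)]

theorem pvSel_mapB (rp : List Int) (l : List Char) (j c : Int) :
    pvSel rp (pvMapB l j) c = pvPosA rp l j c := by
  induction l generalizing j c with
  | nil => simp [pvSel, pvMapB, pvPosA]
  | cons a t ih =>
      by_cases h : pvIsGap a
      · simp [pvMapB, pvPosA, h, ih]
      · simp [pvMapB, pvPosA, h, pvSel_cons, ih]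

theorem pvFoldA (rp : List Int) (l : List Char) (j : Int) (acc : List Int) (c : Int) :
    (PySem.List.enumerate l j).foldl
      (fun (st : List Int × Int) (p : Int × Char) =>
        if pvIsGap p.2 then st
        else ((if st.2 ∈ rp then st.1 ++ [p.1] else st.1), st.2 + 1))
      (acc, c)
    = (acc ++ pvPosA rp l j c, c + (l.countP (fun a => !pvIsGap a))) := by
  induction l generalizing j acc c with
  | nil => simp [PySem.List.enumerate_nil, pvPosA]
  | cons a t ih =>
      rw [PySem.List.enumerate_cons, List.foldl_cons]
      by_cases h : pvIsGap a
      · simp [h, ih, pvPosA]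
      · by_cases hc : c ∈ rp <;>
          simp [h, hc, ih, pvPosA, List.append_assoc] <;> try ring

theorem pvFilterMapB (l : List Char) (j : Int) :
    (PySem.List.enumerate l j).filterMap
      (fun p => if pvIsGap p.2 then none else some p.1) = pvMapB l j := by
  induction l generalizing j with
  | nil => simp [PySem.List.enumerate_nil, pvMapB]
  | cons a t ih =>
      rw [PySem.List.enumerate_cons, List.filterMap_cons]
      by_cases h : pvIsGap a <;> simp [h, pvMapB, ih]

-- the gap-filtered index list in range-filter form, counter offset 0
def pvF (rp : List Int) (n : Nat) : List Nat :=
  (List.range n).filter (fun p : Nat => decide ((p : Int) ∈ rp))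

theorem pvSel_zero (rp : List Int) (m : List Int) :
    pvSel rp m 0 = (pvF rp m.length).map (fun p => m.getD p 0) := by
  unfold pvSel pvF
  congr 1

-- validity of the positions: all inside the ungapped reference and duplicate-free
def pvGood (rp : List Int) (n : Nat) : Prop :=
  rp.Nodup ∧ ∀ x ∈ rp, 0 ≤ x ∧ x < (n : Int)

theorem pvF_pairwise (rp : List Int) (n : Nat) :
    ((pvF rp n).map (fun p : Nat => (p : Int))).Pairwise (· < ·) := by
  rw [List.pairwise_map]
  exact (List.pairwise_lt_range.filter _).imp (by exact_mod_cast fun h => h)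

theorem pvF_mem (rp : List Int) (n : Nat) (x : Int) :
    x ∈ (pvF rp n).map (fun p : Nat => (p : Int)) ↔ (x ∈ rp ∧ 0 ≤ x ∧ x < (n : Int)) := by
  simp only [pvF, List.mem_map, List.mem_filter, List.mem_range, decide_eq_true_eq]
  constructor
  · rintro ⟨p, ⟨hp, hmem⟩, rfl⟩
    exact ⟨hmem, by positivity, by exact_mod_cast hp⟩
  · rintro ⟨hmem, h0, hn⟩
    exact ⟨x.toNat, ⟨by omega, by rwa [Int.toNat_of_nonneg h0]⟩, Int.toNat_of_nonneg h0⟩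

theorem pvGood_sorted (rp : List Int) (n : Nat) (hG : pvGood rp n) :
    PySem.List.sorted rp (fun x => x) false = (pvF rp n).map (fun p : Nat => (p : Int)) := by
  apply PySem.List.sorted_eq_of_perm_of_pairwise_lt
  · apply List.perm_of_nodup_nodup_toFinset_eq ((pvF_pairwise rp n).imp ne_of_lt) hG.1
    ext x
    simp only [List.mem_toFinset, pvF_mem]
    exact ⟨fun h => h.1, fun h => ⟨h, hG.2 x h⟩⟩
  · exact pvF_pairwise rp n

theorem pvLen_iff (rp : List Int) (n : Nat) :
    (pvF rp n).length = rp.length ↔ pvGood rp n := by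
  constructor
  · intro hlen
    set L := (pvF rp n).map (fun p : Nat => (p : Int)) with hL
    have hLnd : L.Nodup := (pvF_pairwise rp n).imp ne_of_lt
    have hLlen : L.length = rp.length := by simp [hL, hlen]
    have hsub : L.toFinset ⊆ rp.toFinset := by
      intro x hx
      rw [List.mem_toFinset] at *
      exact ((pvF_mem rp n x).mp hx).1
    have hcardL : L.toFinset.card = rp.length := by
      rw [List.toFinset_card_of_nodup hLnd, hLlen]
    have hcardrp : rp.toFinset.card = rp.dedup.length := List.card_toFinset rp
    have hle : rp.toFinset.card ≤ rp.length := hcardrp ▸ rp.dedup_sublist.length_le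
    have hcards : rp.toFinset.card = rp.length := le_antisymm hle (hcardL ▸ Finset.card_le_card hsub)
    have hnd : rp.Nodup := by
      rw [← rp.dedup_sublist.eq_of_length (by omega)]
      exact rp.nodup_dedup
    have hfs : L.toFinset = rp.toFinset :=
      Finset.eq_of_subset_of_card_le hsub (by omega)
    refine ⟨hnd, fun x hx => ?_⟩
    have : x ∈ L := by
      rw [← List.mem_toFinset, hfs, List.mem_toFinset]; exact hx
    exact ((pvF_mem rp n x).mp this).2
  · intro hG
    have := pvGood_sorted rp n hG
    have hlen := congrArg List.length this
    simp only [PySem.List.length_sorted, List.length_map] at hlen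
    omega

-- the adjacent-pairs duplicate check characterises strict sortedness of a ≤-sorted list
theorem pvZipAdj (sp : List Int) (hle : sp.Pairwise (· ≤ ·)) :
    ((sp.zip (sp.drop 1)).any (fun q => q.1 == q.2) = false) ↔ sp.Pairwise (· < ·) := by
  induction sp with
  | nil => simp
  | cons a t ih =>
      cases t with
      | nil => simp
      | cons b t' =>
          simp only [List.drop_succ_cons, List.drop_zero, List.zip_cons_cons, List.any_cons,
            Bool.or_eq_false_iff, beq_eq_false_iff_ne, ne_eq]
          have htle : (b :: t').Pairwise (· ≤ ·) := hle.of_cons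
          have ih' := ih htle
          simp only [List.drop_succ_cons, List.drop_zero] at ih'
          rw [ih']
          constructor
          · rintro ⟨hab, htlt⟩
            refine List.Pairwise.cons ?_ htlt
            intro x hx
            have hab' : a < b := lt_of_le_of_ne (List.rel_of_pairwise_cons hle (by simp)) hab
            rcases List.mem_cons.mp hx with rfl | hx'
            · exact hab'
            · exact lt_of_lt_of_le hab' (List.rel_of_pairwise_cons htle hx')
          · intro h
            exact ⟨ne_of_lt (List.rel_of_pairwise_cons h (by simp)), h.of_cons⟩

-- mapM over a mapped list composes (Option monad)
theorem pvMapM_map {α β γ : Type} (l : List α) (g : α → β) (f : β → Option γ) :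
    (l.map g).mapM f = l.mapM (fun x => f (g x)) := by
  induction l with
  | nil => rfl
  | cons a t ih => simp [List.mapM_cons, ih]

-- B's two guards are both false exactly when the positions are valid
theorem pvGuards (rp : List Int) (n : Nat) :
    (((PySem.List.sorted rp (fun x => x) false).any
        (fun p => decide (p < 0) || decide ((n : Int) ≤ p)) = false)
      ∧ (((PySem.List.sorted rp (fun x => x) false).zip
          ((PySem.List.sorted rp (fun x => x) false).drop 1)).any (fun q => q.1 == q.2) = false))
    ↔ pvGood rp n := by
  have hperm := PySem.List.sorted_perm rp (fun x => x) false
  have hle : (PySem.List.sorted rp (fun x => x) false).Pairwise (· ≤ ·) :=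
    PySem.List.sorted_pairwise rp (fun x => x)
  constructor
  · rintro ⟨h1, h2⟩
    have hrange : ∀ x ∈ rp, 0 ≤ x ∧ x < (n : Int) := by
      intro x hx
      have hx' : x ∈ PySem.List.sorted rp (fun x => x) false := hperm.mem_iff.mpr hx
      have := List.any_eq_false.mp h1 x hx'
      simp only [Bool.or_eq_true, decide_eq_true_eq, not_or, not_lt, not_le] at this
      exact this
    have hnd : rp.Nodup := hperm.nodup_iff.mp (((pvZipAdj _ hle).mp h2).imp ne_of_lt)
    exact ⟨hnd, hrange⟩
  · rintro ⟨hnd, hrange⟩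
    refine ⟨List.any_eq_false.mpr fun x hx => ?_, ?_⟩
    · have := hrange x (hperm.mem_iff.mp hx)
      simp only [Bool.or_eq_true, decide_eq_true_eq, not_or, not_lt, not_le]
      exact this
    · refine (pvZipAdj _ hle).mpr ?_
      have hnd' : (PySem.List.sorted rp (fun x => x) false).Nodup := hperm.nodup_iff.mpr hnd
      exact (hle.and hnd').imp fun h => lt_of_le_of_ne h.1 h.2

-- the two ports agree on every input (Pre_ only marks where Python A returns normally)
theorem pvMain (query reference : String) (rp : List Int) :
    get_reference_positions_hmm query reference rp
      = get_reference_positions_hmm_alt query reference rp := by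
  unfold get_reference_positions_hmm get_reference_positions_hmm_alt
  rw [pvFoldA, pvFilterMapB, ← pvSel_mapB rp reference.toList 0 0]
  simp only [List.nil_append]
  set m := pvMapB reference.toList 0 with hm
  rw [pvSel_zero]
  by_cases hG : pvGood rp m.length
  · obtain ⟨hg1, hg2⟩ := (pvGuards rp m.length).mpr hG
    rw [hg1, hg2]
    simp only [Bool.false_eq_true, if_false]
    have hlen : ((pvF rp m.length).map (fun p => m.getD p 0)).length = rp.length := by
      rw [List.length_map]; exact (pvLen_iff rp m.length).mpr hG
    rw [if_neg (by omega)]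
    have hsel : (pvF rp m.length).map (fun p => m.getD p 0)
        = (PySem.List.sorted rp (fun x => x) false).map (fun x => PySem.List.pyGetD m x 0) := by
      rw [pvGood_sorted rp m.length hG, List.map_map]
      refine List.map_congr_left fun p _ => ?_
      simp
    rw [hsel, pvMapM_map]
  · have hlen : ((pvF rp m.length).map (fun p => m.getD p 0)).length ≠ rp.length := by
      rw [List.length_map]
      exact fun h => hG ((pvLen_iff rp m.length).mp h)
    rw [if_pos hlen]
    by_cases h1 : (PySem.List.sorted rp (fun x => x) false).any
        (fun p => decide (p < 0) || decide ((m.length : Int) ≤ p)) = true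
    · rw [if_pos h1]
    · rw [if_neg h1]
      have h2 : ((PySem.List.sorted rp (fun x => x) false).zip
          ((PySem.List.sorted rp (fun x => x) false).drop 1)).any (fun q => q.1 == q.2) = true := by
        by_contra h2
        exact hG ((pvGuards rp m.length).mp
          ⟨Bool.eq_false_iff.mpr h1, Bool.eq_false_iff.mpr h2⟩)
      rw [if_pos h2]

-- ===== VERDICT (by name: the statement is the Claim_ definition above) =====
theorem get_reference_positions_hmm_spec : Claim_equal_get_reference_positions_hmm := by
  intro query reference rp _ _
  unfold Spec_get_reference_positions_hmm
  exact pvMain query reference rp
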